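-- pv_equiv track=rewrite | github.com/yoshikazuuu/competitive-programming | Canvas/canvas.py | find_composite_pairs
-- ===== SOURCE A (Python) =====
-- def is_composite(x):
--   # Buat list faktor yang terdapat pada bilangan x
--   factors = []
--   # Lakukan perulangan sebanyak jumlah bilangan x
--   for i in range(1, x+1):
--     # Jika bilangan i merupakan faktor dari bilangan x, tambahkan ke list faktor
--     if x % i == 0:
--       factors.append(i)
--   # Jika list faktor memiliki lebih dari 2 elemen, berarti bilangan x termasuk bilangan komposit
--   if len(factors) > 2:
--     return True
--   else:
--     return False
--
-- def find_composite_pairs(A, B):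
--   # Buat list untuk menampung hasil pencarian
--   result = []
--   # Lakukan perulangan sebanyak jumlah bilangan antara A dan B
--   for i in range(A, B+1):
--     # Lakukan perulangan sebanyak jumlah bilangan antara A dan B
--     for j in range(A, B+1):
--       # Jika i dan j berbeda dan i, j, dan hasil penjumlahan i dan j termasuk bilangan komposit,
--       # tambahkan ke list hasil
--       if i != j and is_composite(i) and is_composite(j) and is_composite(i+j):
--         # Jika pasangan i dan j belum ada di list hasil, tambahkan ke list hasil
--         if (i, j) not in result and (j, i) not in result:
--           result.append((i, j))
--   # Return list hasil
--   return result
-- ===== SOURCE B (Python) =====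
-- def _is_comp(x):
--     # trial division up to sqrt(x): composite iff some divisor d with 2 <= d, d*d <= x
--     if x < 4:
--         return False
--     d = 2
--     while d * d <= x:
--         if x % d == 0:
--             return True
--         d += 1
--     return False
--
-- def find_composite_pairs(A, B):
--     # collect the composite numbers of the range once, then scan only ordered pairs j > i
--     vals = [v for v in range(A, B + 1) if _is_comp(v)]
--     res = []
--     rest = vals
--     while rest:
--         i, rest = rest[0], rest[1:]
--         for j in rest:
--             if _is_comp(i + j):
--                 res.append((i, j))
--     return res
-- ===== Notes on version B (the rewrite author's own statement) =====
-- stated objective: alternative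
-- what changed: B tests compositeness by trial division up to sqrt(x) instead of enumerating all x divisors, filters the range for composites once, and iterates only ordered pairs j>i, so the per-number divisor enumeration and the quadratic membership scan of the result list disappear.
import Mathlib
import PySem

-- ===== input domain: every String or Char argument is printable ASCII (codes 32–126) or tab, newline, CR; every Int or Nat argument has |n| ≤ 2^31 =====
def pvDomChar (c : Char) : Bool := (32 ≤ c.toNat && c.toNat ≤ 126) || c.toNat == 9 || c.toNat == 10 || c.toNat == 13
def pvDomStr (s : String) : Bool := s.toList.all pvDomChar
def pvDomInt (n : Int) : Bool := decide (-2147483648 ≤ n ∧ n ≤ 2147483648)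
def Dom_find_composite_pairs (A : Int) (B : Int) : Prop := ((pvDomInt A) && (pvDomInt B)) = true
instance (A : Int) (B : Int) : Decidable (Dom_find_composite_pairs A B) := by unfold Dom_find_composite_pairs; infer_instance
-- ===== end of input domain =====

-- B replaces A's full divisor enumeration by trial division up to sqrt, filters the range
-- for composites once, and scans only ordered pairs j > i (objective: alternative).

-- ===== PORT A =====
-- is_composite: collect all divisors of x in 1..x, composite iff more than two of them
def is_composite (x : Int) : Bool :=
  let factors := (PySem.List.pyRange 1 (x+1)).foldl
    (fun fs i => if PySem.Int.mod x i == 0 then fs ++ [i] else fs) []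
  if factors.length > 2 then true else false

def find_composite_pairs (A : Int) (B : Int) : List (List Int) :=
  (PySem.List.pyRange A (B+1)).foldl (fun result i =>
    (PySem.List.pyRange A (B+1)).foldl (fun result j =>
      if (i != j) && is_composite i && is_composite j && is_composite (i+j) then
        if !(result.contains [i,j]) && !(result.contains [j,i]) then
          result ++ [[i,j]]
        else result
      else result) result) []

-- ===== PORT B =====
-- the while loop 'd = 2; while d*d <= x: …; d += 1' of Source B's _is_comp; the '2 ≤ d'
-- conjunct is the loop invariant (d starts at 2 and only grows), kept in the guard so
-- termination is provable; it holds at every call the program makes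
def trial_div (x : Int) (d : Int) : Bool :=
  if h : 2 ≤ d ∧ d * d ≤ x then
    if PySem.Int.mod x d == 0 then true
    else trial_div x (d+1)
  else false
termination_by (x - d).toNat
decreasing_by
  have h1 : d + d ≤ d * d := by nlinarith [h.1, h.2]
  omega

def is_comp (x : Int) : Bool :=
  if x < 4 then false else trial_div x 2

-- the 'while rest:' loop of Source B's find_composite_pairs
def pairsLoop : List Int → List (List Int) → List (List Int)
  | [], res => res
  | i :: rest, res =>
      pairsLoop rest (rest.foldl (fun r j => if is_comp (i+j) then r ++ [[i,j]] else r) res)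

def find_composite_pairs_alt (A : Int) (B : Int) : List (List Int) :=
  pairsLoop ((PySem.List.pyRange A (B+1)).filter is_comp) []

-- ===== PRECONDITION & SPEC =====
def Spec_find_composite_pairs (A : Int) (B : Int) (out : List (List Int)) : Prop := out = find_composite_pairs_alt A B
instance (A : Int) (B : Int) (out : List (List Int)) : Decidable (Spec_find_composite_pairs A B out) := by unfold Spec_find_composite_pairs; infer_instance

-- ===== CLAIM (what is proved, stated in full; the proofs are below) =====
def Claim_equal_find_composite_pairs : Prop := ∀ (A : Int) (B : Int), Dom_find_composite_pairs A B → Spec_find_composite_pairs A B (find_composite_pairs A B)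

-- ===== LEMMAS AND PROOFS =====

-- the condition of A's innermost if, named
def Qb (i j : Int) : Bool := (i != j) && is_composite i && is_composite j && is_composite (i+j)

-- A's result after processing outer prefix `pref` of the range `R`
def Gf (R : List Int) (pref : List Int) : List (List Int) :=
  pref.flatMap (fun i => ((R.filter (fun j => decide (i < j) && Qb i j)).map (fun j => [i,j])))

-- closed-form value of Source B's while loop
def BSpec : List Int → List (List Int)
  | [] => []
  | i :: rest => (rest.filter (fun j => is_comp (i+j))).map (fun j => [i,j]) ++ BSpec rest

-- "x has a divisor d with 2 ≤ d and d*d ≤ x" — the common characterization of compositeness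
def HasSmallFac (x : Int) : Prop := ∃ d : Int, 2 ≤ d ∧ d * d ≤ x ∧ d ∣ x

lemma trial_div_iff (x : Int) : ∀ d : Int, 2 ≤ d →
    (trial_div x d = true ↔ ∃ e : Int, d ≤ e ∧ e * e ≤ x ∧ e ∣ x) := by
  intro d
  fun_induction trial_div x d with
  | case1 d hguard hmod =>
      intro _
      simp only [true_iff]
      exact ⟨d, le_refl d, hguard.2, (PySem.Int.mod_eq_zero_iff_dvd x d).mp (by simpa using hmod)⟩
  | case2 d hguard hmod ih =>
      intro _
      have hnd : ¬ d ∣ x := by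
        intro hdvd
        exact hmod (by simpa using (PySem.Int.mod_eq_zero_iff_dvd x d).mpr hdvd)
      rw [ih (by omega)]
      constructor
      · rintro ⟨e, he1, he2, he3⟩
        exact ⟨e, by omega, he2, he3⟩
      · rintro ⟨e, he1, he2, he3⟩
        refine ⟨e, ?_, he2, he3⟩
        rcases eq_or_lt_of_le he1 with rfl | h
        · exact absurd he3 hnd
        · omega
  | case3 d hguard =>
      intro hd
      simp only [Bool.false_eq_true, false_iff]
      rintro ⟨e, he1, he2, he3⟩
      have : ¬ d * d ≤ x := fun hdd => hguard ⟨hd, hdd⟩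
      nlinarith

lemma is_comp_iff (x : Int) : is_comp x = true ↔ HasSmallFac x := by
  unfold is_comp
  by_cases hx : x < 4
  · simp only [if_pos hx, Bool.false_eq_true, false_iff]
    rintro ⟨d, hd, hdd, _⟩
    nlinarith
  · rw [if_neg hx, trial_div_iff x 2 (by omega)]
    rfl

lemma is_composite_iff (x : Int) : is_composite x = true ↔ HasSmallFac x := by
  have hlen : is_composite x = true ↔
      2 < ((PySem.List.pyRange 1 (x+1)).filter (fun i => PySem.Int.mod x i == 0)).length := by
    unfold is_composite
    rw [PySem.List.foldl_append_if (fun i => PySem.Int.mod x i == 0) (fun i => i)]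
    simp
  rw [hlen]
  set L := (PySem.List.pyRange 1 (x+1)).filter (fun i => PySem.Int.mod x i == 0) with hL
  have hndL : L.Nodup := (PySem.List.nodup_pyRange_one 1 (x+1)).filter _
  have hmemL : ∀ k : Int, k ∈ L ↔ (1 ≤ k ∧ k ≤ x ∧ k ∣ x) := by
    intro k
    rw [hL, List.mem_filter, PySem.List.mem_pyRange_one]
    constructor
    · rintro ⟨⟨h1, h2⟩, h3⟩
      exact ⟨h1, by omega, (PySem.Int.mod_eq_zero_iff_dvd x k).mp (by simpa using h3)⟩
    · rintro ⟨h1, h2, h3⟩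
      exact ⟨⟨h1, by omega⟩, by simpa using (PySem.Int.mod_eq_zero_iff_dvd x k).mpr h3⟩
  constructor
  · -- more than two divisors → a divisor d with d*d ≤ x
    intro hlen3
    have hx1 : 1 ≤ x := by
      by_contra hx
      have : PySem.List.pyRange 1 (x+1) = [] := PySem.List.pyRange_one_eq_nil (by omega)
      rw [hL, this] at hlen3
      simp at hlen3
    -- extract a divisor k different from 1 and x
    have hk : ∃ k ∈ L, k ≠ 1 ∧ k ≠ x := by
      by_contra hall
      push Not at hall
      have hsub : L.toFinset ⊆ ({1, x} : Finset Int) := by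
        intro y hy
        rw [List.mem_toFinset] at hy
        rcases Classical.em (y = 1) with h | h
        · simp [h]
        · simp [hall y hy h]
      have h2 : L.toFinset.card ≤ 2 :=
        le_trans (Finset.card_le_card hsub) (le_trans (Finset.card_insert_le _ _) (by simp))
      rw [List.toFinset_card_of_nodup hndL] at h2
      omega
    obtain ⟨k, hkL, hk1, hkx⟩ := hk
    obtain ⟨h1k, hkx', hkdvd⟩ := (hmemL k).mp hkL
    -- move to ℕ and use the least prime factor
    set n := x.toNat with hn
    have hxn : x = (n : Int) := by omega
    have hmn : k.toNat ∣ n := by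
      rw [← Int.natCast_dvd_natCast]
      rwa [Int.toNat_of_nonneg (by omega), ← hxn]
    have hnp : ¬ n.Prime := by
      intro hp
      rcases hp.eq_one_or_self_of_dvd k.toNat hmn with h | h <;> omega
    have hne1 : n ≠ 1 := by omega
    have hd2 : 2 ≤ n.minFac := (Nat.minFac_prime hne1).two_le
    have hdd : n.minFac * n.minFac ≤ n := by
      have := Nat.minFac_sq_le_self (by omega) hnp
      nlinarith
    refine ⟨(n.minFac : Int), by exact_mod_cast hd2, ?_, ?_⟩
    · rw [hxn]; exact_mod_cast hdd
    · rw [hxn]; exact_mod_cast n.minFac_dvd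
  · -- a divisor d with d*d ≤ x → 1, d, x are three distinct divisors
    rintro ⟨d, hd2, hdd, hddvd⟩
    have hx4 : 4 ≤ x := by nlinarith
    have hdx : d < x := by nlinarith
    have h1L : (1 : Int) ∈ L := (hmemL 1).mpr ⟨le_refl 1, by omega, one_dvd x⟩
    have hdL : d ∈ L := (hmemL d).mpr ⟨by omega, by omega, hddvd⟩
    have hxL : x ∈ L := (hmemL x).mpr ⟨by omega, le_refl x, dvd_refl x⟩
    have hsub : ({1, d, x} : Finset Int) ⊆ L.toFinset := by
      intro y hy
      simp only [Finset.mem_insert, Finset.mem_singleton] at hy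
      rw [List.mem_toFinset]
      rcases hy with rfl | rfl | rfl
      · exact h1L
      · exact hdL
      · exact hxL
    have hcard : ({1, d, x} : Finset Int).card = 3 := by
      rw [Finset.card_insert_of_notMem (by simp; omega),
        Finset.card_insert_of_notMem (by simp; omega), Finset.card_singleton]
    have := Finset.card_le_card hsub
    rw [List.toFinset_card_of_nodup hndL, hcard] at this
    omega

lemma comp_eq (x : Int) : is_composite x = is_comp x := by
  have h1 := is_composite_iff x
  have h2 := is_comp_iff x
  cases hA : is_composite x <;> cases hB : is_comp x <;> simp_all

lemma Qb_symm (i j : Int) : Qb j i = Qb i j := by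
  unfold Qb
  rw [Int.add_comm j i]
  rw [bne_comm]
  cases (i != j) <;> cases is_composite i <;> cases is_composite j <;> simp

lemma mem_Gf {R pref : List Int} {a b : Int} :
    [a,b] ∈ Gf R pref ↔ a ∈ pref ∧ b ∈ R ∧ a < b ∧ Qb a b = true := by
  simp only [Gf, List.mem_flatMap, List.mem_map, List.mem_filter]
  constructor
  · rintro ⟨i, hi, j, ⟨hjR, hcond⟩, heq⟩
    obtain ⟨rfl, rfl⟩ : a = i ∧ b = j := by simpa using heq.symm
    simp only [Bool.and_eq_true, decide_eq_true_eq] at hcond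
    exact ⟨hi, hjR, hcond.1, hcond.2⟩
  · rintro ⟨ha, hb, hlt, hq⟩
    exact ⟨a, ha, b, ⟨hb, by simp [hlt, hq]⟩, rfl⟩

lemma inner_fold (i : Int) : ∀ (S : List Int) (res : List (List Int)),
    S.Nodup →
    (∀ j ∈ S, [i,j] ∉ res) →
    (∀ j ∈ S, ([j,i] ∈ res ↔ (j < i ∧ Qb i j = true))) →
    S.foldl (fun result j =>
      if (i != j) && is_composite i && is_composite j && is_composite (i+j) then
        if !(result.contains [i,j]) && !(result.contains [j,i]) then
          result ++ [[i,j]]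
        else result
      else result) res
    = res ++ (S.filter (fun j => decide (i < j) && Qb i j)).map (fun j => [i,j]) := by
  intro S
  induction S with
  | nil => intro res _ _ _; simp
  | cons j S ih =>
      intro res hnd H1 H2
      rw [List.nodup_cons] at hnd
      rw [List.foldl_cons]
      by_cases hq : Qb i j = true
      · have hij : i ≠ j := by
          have := hq; unfold Qb at this
          simp only [Bool.and_eq_true, bne_iff_ne] at this
          exact this.1.1.1
        have hmem1 : [i,j] ∉ res := H1 j List.mem_cons_self
        have hmem2 : [j,i] ∈ res ↔ (j < i ∧ Qb i j = true) := H2 j List.mem_cons_self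
        by_cases hji : j < i
        · -- (j,i) already in result: skip, and filter drops j since ¬ i < j
          have hin : [j,i] ∈ res := hmem2.mpr ⟨hji, hq⟩
          have hbody : (if (i != j) && is_composite i && is_composite j && is_composite (i+j) then
              if !(res.contains [i,j]) && !(res.contains [j,i]) then res ++ [[i,j]] else res
            else res) = res := by
            have hq' : ((i != j) && is_composite i && is_composite j && is_composite (i+j)) = Qb i j := rfl
            rw [hq', if_pos hq]
            simp [List.contains_eq_mem, hin]
          rw [hbody, List.filter_cons, if_neg (by simp [show ¬ i < j by omega])]
          exact ih res hnd.2 (fun x hx => H1 x (List.mem_cons_of_mem _ hx))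
            (fun x hx => H2 x (List.mem_cons_of_mem _ hx))
        · -- i < j : append [i,j]
          have hlt : i < j := by omega
          have hnin : [j,i] ∉ res := fun h => absurd (hmem2.mp h).1 hji
          have hbody : (if (i != j) && is_composite i && is_composite j && is_composite (i+j) then
              if !(res.contains [i,j]) && !(res.contains [j,i]) then res ++ [[i,j]] else res
            else res) = res ++ [[i,j]] := by
            have hq' : ((i != j) && is_composite i && is_composite j && is_composite (i+j)) = Qb i j := rfl
            rw [hq', if_pos hq]
            simp [List.contains_eq_mem, hmem1, hnin]
          rw [hbody, List.filter_cons, if_pos (by simp [hlt, hq]), List.map_cons]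
          rw [ih (res ++ [[i,j]]) hnd.2 ?_ ?_]
          · simp
          · intro x hx
            simp only [List.mem_append, List.mem_singleton]
            rintro (h | h)
            · exact H1 x (List.mem_cons_of_mem _ hx) h
            · have : x = j := by simpa using h
              exact hnd.1 (this ▸ hx)
          · intro x hx
            rw [List.mem_append]
            constructor
            · rintro (h | h)
              · exact (H2 x (List.mem_cons_of_mem _ hx)).mp h
              · exfalso
                have : x = i ∧ i = j := by simpa using h
                exact hij this.2
            · intro h
              exact Or.inl ((H2 x (List.mem_cons_of_mem _ hx)).mpr h)
      · have hbody : (if (i != j) && is_composite i && is_composite j && is_composite (i+j) then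
            if !(res.contains [i,j]) && !(res.contains [j,i]) then res ++ [[i,j]] else res
          else res) = res := by
          have hq' : ((i != j) && is_composite i && is_composite j && is_composite (i+j)) = Qb i j := rfl
          rw [hq', if_neg hq]
        rw [hbody, List.filter_cons, if_neg (by simp [hq])]
        exact ih res hnd.2 (fun x hx => H1 x (List.mem_cons_of_mem _ hx))
          (fun x hx => H2 x (List.mem_cons_of_mem _ hx))


lemma outer_fold (R : List Int) (hR : R.Pairwise (· < ·)) :
    ∀ (suf pref : List Int), pref ++ suf = R →
    suf.foldl (fun result i =>
      R.foldl (fun result j =>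
        if (i != j) && is_composite i && is_composite j && is_composite (i+j) then
          if !(result.contains [i,j]) && !(result.contains [j,i]) then
            result ++ [[i,j]]
          else result
        else result) result) (Gf R pref) = Gf R R := by
  intro suf
  induction suf with
  | nil =>
      intro pref h
      rw [List.foldl_nil, ← h, List.append_nil]
  | cons i suf ih =>
      intro pref h
      have hnd : R.Nodup := hR.imp (fun h => ne_of_lt h)
      have hR' : (pref ++ i :: suf).Pairwise (· < ·) := h ▸ hR
      rw [List.pairwise_append] at hR'
      have hpref_lt : ∀ a ∈ pref, a < i := fun a ha => hR'.2.2 a ha i List.mem_cons_self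
      have hsuf_gt : ∀ b ∈ suf, i < b := (List.pairwise_cons.mp hR'.2.1).1
      have hiR : i ∈ R := h ▸ List.mem_append_right _ List.mem_cons_self
      have H1 : ∀ j ∈ R, [i,j] ∉ Gf R pref := by
        intro j _ hmem
        have := (mem_Gf.mp hmem).1
        exact absurd (hpref_lt i this) (lt_irrefl i)
      have H2 : ∀ j ∈ R, ([j,i] ∈ Gf R pref ↔ (j < i ∧ Qb i j = true)) := by
        intro j hj
        constructor
        · intro hmem
          obtain ⟨hjp, _, hlt, hq⟩ := mem_Gf.mp hmem
          exact ⟨hlt, Qb_symm i j ▸ hq⟩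
        · rintro ⟨hlt, hq⟩
          have hjpref : j ∈ pref := by
            rw [← h, List.mem_append, List.mem_cons] at hj
            rcases hj with hj | hj | hj
            · exact hj
            · omega
            · exact absurd (hsuf_gt j hj) (by omega)
          exact mem_Gf.mpr ⟨hjpref, hiR, hlt, Qb_symm i j ▸ hq⟩
      rw [List.foldl_cons, inner_fold i R (Gf R pref) hnd H1 H2]
      have hGf : Gf R pref ++ (R.filter (fun j => decide (i < j) && Qb i j)).map (fun j => [i,j])
          = Gf R (pref ++ [i]) := by
        simp [Gf]
      rw [hGf]
      exact ih (pref ++ [i]) (by rw [List.append_assoc]; simpa using h)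

lemma pairsLoop_eq : ∀ (V : List Int) (res : List (List Int)),
    pairsLoop V res = res ++ BSpec V := by
  intro V
  induction V with
  | nil => intro res; simp [pairsLoop, BSpec]
  | cons i rest ih =>
      intro res
      rw [pairsLoop, PySem.List.foldl_append_if (fun j => is_comp (i+j)) (fun j => [i,j]), ih, BSpec]
      simp


lemma flatMap_restrict {α β : Type} (p : α → Bool) (f : α → List β) :
    ∀ l : List α, (∀ a ∈ l, p a = false → f a = []) →
    l.flatMap f = (l.filter p).flatMap f := by
  intro l
  induction l with
  | nil => simp
  | cons a l ih =>
      intro h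
      by_cases hp : p a = true
      · simp [List.filter_cons_of_pos hp, ih fun x hx => h x (List.mem_cons_of_mem _ hx)]
      · rw [List.flatMap_cons, h a (List.mem_cons_self) (by simpa using hp),
          List.filter_cons_of_neg (by simpa using hp), ih fun x hx => h x (List.mem_cons_of_mem _ hx)]
        simp

lemma flatMap_congr_mem {α β : Type} (f g : α → List β) :
    ∀ l : List α, (∀ a ∈ l, f a = g a) → l.flatMap f = l.flatMap g := by
  intro l
  induction l with
  | nil => simp
  | cons a l ih =>
      intro h
      rw [List.flatMap_cons, List.flatMap_cons, h a List.mem_cons_self,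
        ih fun x hx => h x (List.mem_cons_of_mem _ hx)]


lemma bspec_eq (V : List Int) (hV : V.Pairwise (· < ·)) :
    V.flatMap (fun i => ((V.filter (fun j => decide (i < j) && is_comp (i+j))).map (fun j => [i,j])))
      = BSpec V := by
  induction V with
  | nil => simp [BSpec]
  | cons i rest ih =>
      rw [List.pairwise_cons] at hV
      rw [List.flatMap_cons, BSpec]
      congr 1
      · rw [List.filter_cons_of_neg (by simp)]
        congr 1
        apply List.filter_congr
        intro j hj
        simp [hV.1 j hj]
      · rw [flatMap_congr_mem _ (fun a => ((rest.filter (fun j => decide (a < j) && is_comp (a+j))).map (fun j => [a,j])))]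
        · exact ih hV.2
        · intro a ha
          have hne : ¬ (decide (a < i) && is_comp (a+i)) = true := by
            have := hV.1 a ha
            simp [show ¬ a < i by omega]
          rw [List.filter_cons, if_neg hne]


lemma G_eq_BSpec (R : List Int) (hR : R.Pairwise (· < ·)) :
    Gf R R = BSpec (R.filter is_comp) := by
  have hfun : is_composite = is_comp := funext comp_eq
  have h1 : Gf R R = (R.filter is_comp).flatMap
      (fun i => ((R.filter (fun j => decide (i < j) && Qb i j)).map (fun j => [i,j]))) := by
    rw [Gf, flatMap_restrict is_comp]
    intro a _ ha
    have hca : is_composite a = false := by rw [hfun]; exact ha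
    have : ∀ j : Int, (decide (a < j) && Qb a j) = false := by
      intro j; simp [Qb, hca]
    simp [this]
  rw [h1]
  rw [flatMap_congr_mem _ (fun i =>
      (((R.filter is_comp).filter (fun j => decide (i < j) && is_comp (i+j))).map (fun j => [i,j])))]
  · exact bspec_eq _ (hR.sublist List.filter_sublist)
  · intro a ha
    have hca : is_composite a = true := by
      rw [hfun]; exact (List.mem_filter.mp ha).2
    congr 1
    rw [List.filter_filter]
    apply List.filter_congr
    intro j _
    by_cases hlt : a < j
    · have hne : (a != j) = true := by simp; omega
      have hca' : is_comp a = true := hfun ▸ hca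
      simp [Qb, hlt, hne, hca', hfun, Bool.and_comm]
    · simp [hlt]


-- ===== VERDICT (by name: the statement is the Claim_ definition above) =====
theorem find_composite_pairs_spec : Claim_equal_find_composite_pairs := by
  intro A B _
  unfold Spec_find_composite_pairs find_composite_pairs find_composite_pairs_alt
  have hR := PySem.List.pairwise_lt_pyRange_one A (B+1)
  rw [pairsLoop_eq, ← G_eq_BSpec _ hR]
  have h := outer_fold (PySem.List.pyRange A (B+1)) hR (PySem.List.pyRange A (B+1)) [] rfl
  simpa [Gf] using h
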